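-- pv_equiv track=rewrite | github.com/xtsjhyxbd/ner_and_ee | KBQA/RelationExtraction/report_relation_extraction.py | _process_later_cover
-- ===== SOURCE A (Python) =====
-- def _process_later_cover(m):
--     res = dict(m)
--     _delete_key = []        #    # finance_word:  {75: '营业收入', 43: '归母净利润', 107: '归母净利润', 45: '净利润', 109: '净利润', 21: '营收'}    删除m中key为43和45的问题
--     for i in m:
--         _i_value = m[i]
--         for j in m:
--             _j_value = m[j]
--             if i != j:
--                 if (i < j) and (_j_value in _i_value) and ((j-i) == (len(_i_value) - len(_j_value))):
--                     if j not in _delete_key:      # 20220402  删除重复项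
--                         _delete_key.append(j)
--     for k in range(len(_delete_key)):
--         del res[_delete_key[k]]
--     return res
-- ===== SOURCE B (Python) =====
-- def _process_later_cover(m):
--     # Bucket entries by endpoint key + len(value): the deletion condition
--     # (j - i) == len(m[i]) - len(m[j]) says i + len(m[i]) == j + len(m[j]),
--     # so only entries in the same bucket can delete each other.
--     groups = {}
--     for k in m:
--         v = m[k]
--         groups.setdefault(k + len(v), []).append((k, v))
--     dead = set()
--     for bucket in groups.values():
--         for j, vj in bucket:
--             if any(i < j and vj in vi for i, vi in bucket):
--                 dead.add(j)
--     return {k: v for k, v in m.items() if k not in dead}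
-- ===== Notes on version B (the rewrite author's own statement) =====
-- stated objective: faster
-- what changed: Replaces the all-pairs key scan with one pass that buckets entries by endpoint key+len(value) (the length equation forces equal endpoints), then compares only within each bucket and filters the dict once.
import Mathlib
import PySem

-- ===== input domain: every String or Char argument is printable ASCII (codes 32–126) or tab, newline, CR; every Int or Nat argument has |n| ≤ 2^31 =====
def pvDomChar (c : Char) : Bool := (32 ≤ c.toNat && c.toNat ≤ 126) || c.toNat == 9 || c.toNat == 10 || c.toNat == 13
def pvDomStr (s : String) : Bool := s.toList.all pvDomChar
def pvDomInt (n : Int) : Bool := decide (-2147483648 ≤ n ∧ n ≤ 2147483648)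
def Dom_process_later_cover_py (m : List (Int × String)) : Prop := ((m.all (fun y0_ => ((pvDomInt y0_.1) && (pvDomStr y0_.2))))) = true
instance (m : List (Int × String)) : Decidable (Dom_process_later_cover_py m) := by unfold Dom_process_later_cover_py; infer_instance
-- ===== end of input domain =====

-- B replaces A's all-pairs key scan by bucketing the dict's entries by endpoint key+len(value)
-- (the deletion condition forces equal endpoints) and comparing only inside each bucket: faster on
-- dicts with many distinct endpoints.  Equivalence is about the returned dict (neither mutates m).

-- ===== PORT A =====
-- The parameter arrives in Python as a dict, so both ports work on (PySem.Dict.ofList m).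
-- `m[i]` is ported as `md.getD i ""`: exact here because i is always a key of md, so the
-- default is never used; `del res[k]` is ported as `Dict.erase`: exact here because the
-- deduplicated _delete_key holds distinct existing keys, so Python's KeyError never fires.
def process_later_cover_py (m : List (Int × String)) : List (Int × String) :=
  let md := PySem.Dict.ofList m
  let res := PySem.Dict.ofList m                    -- res = dict(m)
  let deleteKey : List Int :=                        -- _delete_key, built by the nested loop
    md.keys.foldl (fun dk i =>
      let iv := md.getD i ""                         -- _i_value = m[i]
      md.keys.foldl (fun dk j =>
        let jv := md.getD j ""                       -- _j_value = m[j]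
        if i ≠ j then
          if i < j ∧ PySem.Str.isIn jv iv = true ∧
              j - i = PySem.Str.len iv - PySem.Str.len jv then
            if j ∉ dk then dk ++ [j] else dk         -- dedup append
          else dk
        else dk) dk) []
  ((PySem.List.pyRange 0 (PySem.List.len deleteKey)).foldl
      (fun r k => r.erase (PySem.List.pyGetD deleteKey k 0)) res).items

-- ===== PORT B =====
def process_later_cover_py_alt (m : List (Int × String)) : List (Int × String) :=
  let items := (PySem.Dict.ofList m).items
  let groups : PySem.Dict Int (List (Int × String)) :=     -- groups.setdefault(k+len(v),[]).append((k,v))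
    items.foldl (fun g kv =>
      g.modify (kv.1 + PySem.Str.len kv.2) [] (fun b => b ++ [kv])) PySem.Dict.empty
  let dead : PySem.Set Int :=
    groups.values.foldl (fun d bucket =>
      bucket.foldl (fun d jv =>
        if bucket.any (fun iv => decide (iv.1 < jv.1) && PySem.Str.isIn jv.2 iv.2) then
          PySem.Set.add d jv.1
        else d) d) PySem.Set.empty
  items.filter (fun kv => !(PySem.Set.contains dead kv.1))

-- ===== PRECONDITION & SPEC =====
def Spec_process_later_cover_py (m : List (Int × String)) (out : List (Int × String)) : Prop := out = process_later_cover_py_alt m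
instance (m : List (Int × String)) (out : List (Int × String)) : Decidable (Spec_process_later_cover_py m out) := by unfold Spec_process_later_cover_py; infer_instance

-- ===== CLAIM (what is proved, stated in full; the proofs are below) =====
def Claim_equal_process_later_cover_py : Prop := ∀ (m : List (Int × String)), Dom_process_later_cover_py m → Spec_process_later_cover_py m (process_later_cover_py m)

-- ===== LEMMAS AND PROOFS =====

-- membership in a fold whose step either leaves the accumulator's members alone or adds C b
theorem pv_mem_foldl_step {α β : Type} (l : List β) (dk0 : List α) (step : List α → β → List α)
    (C : β → α → Prop) (x : α)
    (h : ∀ dk b, b ∈ l → ∀ y, y ∈ step dk b ↔ y ∈ dk ∨ C b y) :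
    x ∈ l.foldl step dk0 ↔ x ∈ dk0 ∨ ∃ b ∈ l, C b x := by
  induction l generalizing dk0 with
  | nil => simp
  | cons b t ih =>
    simp only [List.foldl_cons]
    rw [ih _ (fun dk b' hb y => h dk b' (List.mem_cons_of_mem _ hb) y),
        h dk0 b (List.mem_cons_self ..) x]
    simp only [List.mem_cons]
    constructor
    · rintro ((h1 | h1) | ⟨b', hb', hc⟩)
      · exact Or.inl h1
      · exact Or.inr ⟨b, Or.inl rfl, h1⟩
      · exact Or.inr ⟨b', Or.inr hb', hc⟩
    · rintro (h1 | ⟨b', (rfl | hb'), hc⟩)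
      · exact Or.inl (Or.inl h1)
      · exact Or.inl (Or.inr hc)
      · exact Or.inr ⟨b', hb', hc⟩

-- the del-loop: erasing every key of dk from d filters d's items
theorem pv_erase_fold_items (dk : List Int) (d : PySem.Dict Int String) :
    (dk.foldl (fun r x => r.erase x) d).items
      = d.items.filter (fun p => !dk.contains p.1) := by
  induction dk generalizing d with
  | nil => simp
  | cons k t ih =>
    rw [List.foldl_cons, ih, PySem.Dict.erase]
    show List.filter _ (List.filter _ d.items) = _
    rw [List.filter_filter]
    apply List.filter_congr
    intro p _
    rw [List.contains_cons]
    cases (p.1 == k) <;> cases t.contains p.1 <;> rfl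

-- the shared deletion predicate: jv is deleted iff some earlier key i with the same
-- endpoint i+len(m[i]) = j+len(m[j]) has m[j] as a substring of m[i]
def pvP (L : List (Int × String)) (jv : Int × String) : Prop :=
  ∃ iv ∈ L, iv.1 < jv.1 ∧ PySem.Str.isIn jv.2 iv.2 = true ∧
    iv.1 + PySem.Str.len iv.2 = jv.1 + PySem.Str.len jv.2

-- membership in A's dedup-append step
theorem pv_mem_dedup_append {α : Type} [DecidableEq α] (dk : List α) (j y : α) :
    y ∈ (if j ∉ dk then dk ++ [j] else dk) ↔ y ∈ dk ∨ y = j := by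
  split_ifs with h
  · constructor
    · exact Or.inl
    · rintro (hy | rfl)
      · exact hy
      · exact h
  · simp

-- A's _delete_key holds exactly the keys satisfying pvP
theorem pv_deleteKey_char (md : PySem.Dict Int String) (hnd : md.keys.Nodup) (x : Int) :
    x ∈ md.keys.foldl (fun dk i =>
      md.keys.foldl (fun dk j =>
        if i ≠ j then
          if i < j ∧ PySem.Str.isIn (md.getD j "") (md.getD i "") = true ∧
              j - i = PySem.Str.len (md.getD i "") - PySem.Str.len (md.getD j "") then
            if j ∉ dk then dk ++ [j] else dk
          else dk
        else dk) dk) []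
    ↔ ∃ jv ∈ md.items, x = jv.1 ∧ pvP md.items jv := by
  rw [pv_mem_foldl_step _ _ _
    (C := fun i y => ∃ j ∈ md.keys, (i ≠ j ∧ i < j ∧
        PySem.Str.isIn (md.getD j "") (md.getD i "") = true ∧
        j - i = PySem.Str.len (md.getD i "") - PySem.Str.len (md.getD j "")) ∧ y = j)
    (h := by
      intro dk i _ y
      rw [pv_mem_foldl_step _ _ _
        (C := fun j y => (i ≠ j ∧ i < j ∧
            PySem.Str.isIn (md.getD j "") (md.getD i "") = true ∧
            j - i = PySem.Str.len (md.getD i "") - PySem.Str.len (md.getD j "")) ∧ y = j)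
        (h := by
          intro dk' j _ y'
          by_cases h1 : i ≠ j
          · rw [if_pos h1]
            by_cases h2 : i < j ∧ PySem.Str.isIn (md.getD j "") (md.getD i "") = true ∧
                j - i = PySem.Str.len (md.getD i "") - PySem.Str.len (md.getD j "")
            · rw [if_pos h2, pv_mem_dedup_append]
              constructor
              · rintro (h | rfl)
                · exact Or.inl h
                · exact Or.inr ⟨⟨h1, h2.1, h2.2.1, h2.2.2⟩, rfl⟩
              · rintro (h | ⟨-, rfl⟩)
                · exact Or.inl h
                · exact Or.inr rfl
            · rw [if_neg h2]
              constructor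
              · exact Or.inl
              · rintro (h | ⟨⟨-, hlt, hA, hB⟩, rfl⟩)
                · exact h
                · exact absurd ⟨hlt, hA, hB⟩ h2
          · rw [if_neg h1]
            constructor
            · exact Or.inl
            · rintro (h | ⟨⟨hne, -⟩, rfl⟩)
              · exact h
              · exact absurd hne h1)])]
  simp only [List.mem_nil_iff, false_or]
  constructor
  · rintro ⟨i, hi, j, hj, ⟨-, hlt, hin, hlen⟩, rfl⟩
    simp only [PySem.Dict.keys, List.mem_map] at hi hj
    obtain ⟨iv, hivm, rfl⟩ := hi
    obtain ⟨jv, hjvm, rfl⟩ := hj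
    have hgi : md.getD iv.1 "" = iv.2 := PySem.Dict.getD_of_mem_items md (by exact hivm) hnd ""
    have hgj : md.getD jv.1 "" = jv.2 := PySem.Dict.getD_of_mem_items md (by exact hjvm) hnd ""
    rw [hgi, hgj] at hin hlen
    exact ⟨jv, hjvm, rfl, iv, hivm, hlt, hin, by omega⟩
  · rintro ⟨jv, hjvm, rfl, iv, hivm, hlt, hin, hend⟩
    have hgi : md.getD iv.1 "" = iv.2 := PySem.Dict.getD_of_mem_items md (by exact hivm) hnd ""
    have hgj : md.getD jv.1 "" = jv.2 := PySem.Dict.getD_of_mem_items md (by exact hjvm) hnd ""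
    refine ⟨iv.1, ?_, jv.1, ?_, ⟨by omega, hlt, ?_, ?_⟩, rfl⟩
    · exact List.mem_map.mpr ⟨iv, hivm, rfl⟩
    · exact List.mem_map.mpr ⟨jv, hjvm, rfl⟩
    · rw [hgi, hgj]; exact hin
    · rw [hgi, hgj]; omega

-- the bucket at endpoint c is the filter of the items by endpoint
theorem pv_groups_getD (L : List (Int × String)) (c : Int) :
    (L.foldl (fun g kv =>
        g.modify (kv.1 + PySem.Str.len kv.2) [] (fun b => b ++ [kv]))
        (PySem.Dict.empty : PySem.Dict Int (List (Int × String)))).getD c []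
      = L.filter (fun kv => kv.1 + PySem.Str.len kv.2 == c) := by
  have := PySem.Dict.getD_foldl_modify_append
    (L.map (fun kv => (kv.1 + PySem.Str.len kv.2, kv)))
    (PySem.Dict.empty : PySem.Dict Int (List (Int × String))) c
  rw [List.foldl_map] at this
  simp only [this, PySem.Dict.getD_empty, List.nil_append, List.filter_map]
  rw [List.map_map]
  simp [Function.comp_def]

-- B's dead set holds exactly the keys satisfying pvP
theorem pv_dead_char (L : List (Int × String)) (x : Int) :
    x ∈ (let groups : PySem.Dict Int (List (Int × String)) :=
        L.foldl (fun g kv =>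
          g.modify (kv.1 + PySem.Str.len kv.2) [] (fun b => b ++ [kv])) PySem.Dict.empty
      groups.values.foldl (fun d bucket =>
        bucket.foldl (fun d jv =>
          if bucket.any (fun iv => decide (iv.1 < jv.1) && PySem.Str.isIn jv.2 iv.2) then
            PySem.Set.add d jv.1
          else d) d) PySem.Set.empty)
    ↔ ∃ jv ∈ L, x = jv.1 ∧ pvP L jv := by
  simp only []
  set groups : PySem.Dict Int (List (Int × String)) :=
    L.foldl (fun g kv =>
      g.modify (kv.1 + PySem.Str.len kv.2) [] (fun b => b ++ [kv])) PySem.Dict.empty with hg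
  have hknd : groups.keys.Nodup := by
    rw [hg]
    exact PySem.Dict.nodup_keys_foldl_modify_key L (fun kv => kv.1 + PySem.Str.len kv.2)
      [] (fun g kv b => b ++ [kv]) PySem.Dict.empty (by simp)
  have hkeys : groups.keys = PySem.Set.ofList (L.map (fun kv => kv.1 + PySem.Str.len kv.2)) := by
    rw [hg, PySem.Dict.keys_foldl_modify_key L (fun kv => kv.1 + PySem.Str.len kv.2)
      [] (fun g kv b => b ++ [kv])]
    simp [PySem.Set.ofList_eq_foldl, PySem.Set.update, PySem.Dict.keys_empty]
  have hvals : groups.values = groups.keys.map (fun c => groups.getD c []) :=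
    PySem.Dict.values_eq_map_keys groups hknd []
  rw [pv_mem_foldl_step _ _ _
    (C := fun bucket y => ∃ jv ∈ bucket,
      (bucket.any (fun iv => decide (iv.1 < jv.1) && PySem.Str.isIn jv.2 iv.2)) = true ∧ y = jv.1)
    (h := by
      intro d bucket _ y
      rw [pv_mem_foldl_step _ _ _
        (C := fun jv y =>
          (bucket.any (fun iv => decide (iv.1 < jv.1) && PySem.Str.isIn jv.2 iv.2)) = true ∧ y = jv.1)
        (h := by
          intro d' jv _ y'
          split_ifs with hc
          · rw [PySem.Set.mem_add]
            exact ⟨fun h => h.imp id (fun e => ⟨hc, e⟩), fun h => h.imp id (fun e => e.2)⟩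
          · exact ⟨Or.inl, fun h => h.elim id (fun e => absurd e.1 hc)⟩)])]
  simp only [PySem.Set.empty, List.mem_nil_iff, false_or]
  constructor
  · rintro ⟨bucket, hb, jv, hjvb, hany, rfl⟩
    rw [hvals] at hb
    obtain ⟨c, hc, rfl⟩ := List.mem_map.mp hb
    rw [pv_groups_getD] at hjvb hany
    obtain ⟨hjL, hjc⟩ := List.mem_filter.mp hjvb
    obtain ⟨iv, hivb, hiv⟩ := List.any_eq_true.mp hany
    obtain ⟨hiL, hic⟩ := List.mem_filter.mp hivb
    simp only [Bool.and_eq_true, decide_eq_true_eq] at hiv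
    refine ⟨jv, hjL, rfl, iv, hiL, hiv.1, hiv.2, ?_⟩
    simp only [beq_iff_eq] at hjc hic
    omega
  · rintro ⟨jv, hjL, rfl, iv, hiL, hlt, hin, hend⟩
    refine ⟨groups.getD (jv.1 + PySem.Str.len jv.2) [], ?_, jv, ?_, ?_, rfl⟩
    · rw [hvals]
      refine List.mem_map.mpr ⟨jv.1 + PySem.Str.len jv.2, ?_, rfl⟩
      rw [hkeys, PySem.Set.mem_ofList]
      exact List.mem_map.mpr ⟨jv, hjL, rfl⟩
    · rw [pv_groups_getD]
      exact List.mem_filter.mpr ⟨hjL, by simp only [beq_iff_eq]⟩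
    · rw [pv_groups_getD]
      refine List.any_eq_true.mpr
        ⟨iv, List.mem_filter.mpr ⟨hiL, by simp only [beq_iff_eq]; omega⟩, ?_⟩
      simp only [Bool.and_eq_true, decide_eq_true_eq]
      exact ⟨hlt, hin⟩

-- ===== VERDICT (by name: the statement is the Claim_ definition above) =====
theorem process_later_cover_py_spec : Claim_equal_process_later_cover_py := by
  intro m _dom
  unfold Spec_process_later_cover_py process_later_cover_py process_later_cover_py_alt
  simp only []
  set md := PySem.Dict.ofList m with hmd
  have hnd : md.keys.Nodup := PySem.Dict.nodup_keys_ofList m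
  rw [PySem.List.foldl_pyRange_pyGetD _ 0 (fun r x => r.erase x) md (by norm_num)]
  rw [Int.toNat_zero, List.drop_zero, pv_erase_fold_items]
  apply List.filter_congr
  intro p _
  have hA := pv_deleteKey_char md hnd p.1
  have hB := pv_dead_char md.items p.1
  simp only [PySem.Set.contains]
  congr 1
  rw [Bool.eq_iff_iff, List.contains_iff_mem, List.contains_iff_mem]
  exact hA.trans hB.symm
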